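-- pv_equiv track=rewrite | github.com/Iamkrmayank/Document-Generation | template_inference_clean.py | _infer_page_role_from_content
-- ===== SOURCE A (Python) =====
-- from typing import List, Dict, Any, Optional
-- from collections import defaultdict, Counter
--
-- def _infer_page_role_from_content(pages: List[Dict[str, Any]], page_num: int) -> str:
--     """Infer the role/purpose of this page based on content"""
--
--     # Analyze elements to determine page role
--     element_types = []
--     for page in pages:
--         for element in page.get('elements', []):
--             element_types.append(element.get('type', '').lower())
--
--     element_counter = Counter(element_types)
--
--     # Page 1 is usually cover/introduction
--     if page_num == 1:
--         return 'cover_introduction'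
--
--     # Determine role based on dominant content
--     if any('executive_summary' in elem for elem in element_types):
--         return 'executive_summary'
--     elif any('chart' in elem or 'graph' in elem for elem in element_types):
--         if any('financial' in elem or 'revenue' in elem for elem in element_types):
--             return 'financial_analysis'
--         else:
--             return 'data_visualization'
--     elif any('contact' in elem for elem in element_types):
--         return 'contact_information'
--     elif any('table' in elem for elem in element_types):
--         return 'tabular_data'
--     elif element_counter.get('paragraph', 0) > 2:
--         return 'detailed_content'
--     else:
--         return 'mixed_content'
-- ===== SOURCE B (Python) =====
-- def _infer_page_role_from_content(pages, page_num):
--     """Infer the role/purpose of this page based on content (single-pass flags)."""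
--     if page_num == 1:
--         return 'cover_introduction'
--     has_exec = has_chart = has_fin = has_contact = has_table = False
--     paragraph_count = 0
--     for page in pages:
--         for element in page.get('elements', []):
--             t = element.get('type', '').lower()
--             has_exec = has_exec or 'executive_summary' in t
--             has_chart = has_chart or 'chart' in t or 'graph' in t
--             has_fin = has_fin or 'financial' in t or 'revenue' in t
--             has_contact = has_contact or 'contact' in t
--             has_table = has_table or 'table' in t
--             if t == 'paragraph':
--                 paragraph_count += 1
--     if has_exec:
--         return 'executive_summary'
--     if has_chart:
--         return 'financial_analysis' if has_fin else 'data_visualization'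
--     if has_contact:
--         return 'contact_information'
--     if has_table:
--         return 'tabular_data'
--     if paragraph_count > 2:
--         return 'detailed_content'
--     return 'mixed_content'
-- ===== Notes on version B (the rewrite author's own statement) =====
-- stated objective: simpler
-- what changed: Replaces the intermediate element_types list, the Counter and six separate any(...) substring scans with one single pass over the elements that accumulates five boolean flags and a paragraph count, then decides the role from those flags.
import Mathlib
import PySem

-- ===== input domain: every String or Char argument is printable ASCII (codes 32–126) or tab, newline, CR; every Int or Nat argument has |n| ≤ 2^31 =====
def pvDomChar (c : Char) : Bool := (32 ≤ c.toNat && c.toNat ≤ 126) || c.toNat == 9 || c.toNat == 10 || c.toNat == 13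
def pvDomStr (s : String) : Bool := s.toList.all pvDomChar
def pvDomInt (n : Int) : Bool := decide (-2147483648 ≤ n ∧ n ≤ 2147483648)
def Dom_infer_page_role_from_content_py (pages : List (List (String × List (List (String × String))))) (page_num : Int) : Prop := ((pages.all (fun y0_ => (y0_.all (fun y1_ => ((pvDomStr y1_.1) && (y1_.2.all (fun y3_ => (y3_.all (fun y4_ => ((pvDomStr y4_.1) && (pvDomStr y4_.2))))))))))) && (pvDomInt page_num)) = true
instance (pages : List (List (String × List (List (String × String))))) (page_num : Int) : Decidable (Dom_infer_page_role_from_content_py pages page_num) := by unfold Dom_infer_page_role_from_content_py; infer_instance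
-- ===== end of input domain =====

-- B replaces A's intermediate type-list + Counter + six any() scans with one single pass accumulating five flags and a paragraph count (objective: simpler).


-- ===== PORT A =====
-- Port of A: builds the full list of lowered element-type strings, a Counter, then six any(...) scans.
def infer_page_role_from_content_py (pages : List (List (String × List (List (String × String))))) (page_num : Int) : String :=
  let element_types : List String := pages.foldl (fun acc page =>
    (PySem.Dict.getD ⟨page⟩ "elements" []).foldl
      (fun acc2 el => acc2 ++ [PySem.Str.lower (PySem.Dict.getD ⟨el⟩ "type" "")]) acc) []
  let element_counter : PySem.Dict String Int := PySem.Dict.counter element_types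
  if page_num = 1 then "cover_introduction"
  else if element_types.any (fun elem => PySem.Str.isIn "executive_summary" elem) then "executive_summary"
  else if element_types.any (fun elem => PySem.Str.isIn "chart" elem || PySem.Str.isIn "graph" elem) then
    (if element_types.any (fun elem => PySem.Str.isIn "financial" elem || PySem.Str.isIn "revenue" elem) then
      "financial_analysis"
    else "data_visualization")
  else if element_types.any (fun elem => PySem.Str.isIn "contact" elem) then "contact_information"
  else if element_types.any (fun elem => PySem.Str.isIn "table" elem) then "tabular_data"
  else if element_counter.getD "paragraph" 0 > 2 then "detailed_content"
  else "mixed_content"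

-- ===== PORT B =====
-- B: one pass over all elements accumulating five boolean flags and a paragraph count, then the cascade.
def pvStepT (st : Bool × Bool × Bool × Bool × Bool × Int) (t : String) :
    Bool × Bool × Bool × Bool × Bool × Int :=
  (st.1 || PySem.Str.isIn "executive_summary" t,
   st.2.1 || (PySem.Str.isIn "chart" t || PySem.Str.isIn "graph" t),
   st.2.2.1 || (PySem.Str.isIn "financial" t || PySem.Str.isIn "revenue" t),
   st.2.2.2.1 || PySem.Str.isIn "contact" t,
   st.2.2.2.2.1 || PySem.Str.isIn "table" t,
   st.2.2.2.2.2 + (if t == "paragraph" then 1 else 0))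

def infer_page_role_from_content_py_alt (pages : List (List (String × List (List (String × String))))) (page_num : Int) : String :=
  if page_num = 1 then "cover_introduction"
  else
    let st := pages.foldl (fun st page =>
      (PySem.Dict.getD ⟨page⟩ "elements" []).foldl
        (fun st el => pvStepT st (PySem.Str.lower (PySem.Dict.getD ⟨el⟩ "type" ""))) st)
      (false, false, false, false, false, (0 : Int))
    if st.1 then "executive_summary"
    else if st.2.1 then (if st.2.2.1 then "financial_analysis" else "data_visualization")
    else if st.2.2.2.1 then "contact_information"
    else if st.2.2.2.2.1 then "tabular_data"
    else if st.2.2.2.2.2 > 2 then "detailed_content"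
    else "mixed_content"

-- ===== PRECONDITION & SPEC =====
def Spec_infer_page_role_from_content_py (pages : List (List (String × List (List (String × String))))) (page_num : Int) (out : String) : Prop := out = infer_page_role_from_content_py_alt pages page_num
instance (pages : List (List (String × List (List (String × String))))) (page_num : Int) (out : String) : Decidable (Spec_infer_page_role_from_content_py pages page_num out) := by unfold Spec_infer_page_role_from_content_py; infer_instance

-- ===== CLAIM (what is proved, stated in full; the proofs are below) =====
def Claim_equal_infer_page_role_from_content_py : Prop := ∀ (pages : List (List (String × List (List (String × String))))) (page_num : Int), Dom_infer_page_role_from_content_py pages page_num → Spec_infer_page_role_from_content_py pages page_num (infer_page_role_from_content_py pages page_num)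

-- ===== LEMMAS AND PROOFS =====

-- the flat list of lowered element-type strings both programs traverse
def pvTypes (pages : List (List (String × List (List (String × String))))) : List String :=
  pages.flatMap (fun page =>
    (PySem.Dict.getD ⟨page⟩ "elements" []).map (fun el => PySem.Str.lower (PySem.Dict.getD ⟨el⟩ "type" "")))

theorem pvTypesA (pages : List (List (String × List (List (String × String)))))
    (acc : List String) :
    pages.foldl (fun acc page =>
      (PySem.Dict.getD ⟨page⟩ "elements" []).foldl
        (fun acc2 el => acc2 ++ [PySem.Str.lower (PySem.Dict.getD ⟨el⟩ "type" "")]) acc) acc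
    = acc ++ pvTypes pages := by
  induction pages generalizing acc with
  | nil => simp [pvTypes]
  | cons p ps ih =>
    rw [List.foldl_cons, PySem.List.foldl_append_singleton_eq_map, ih]
    simp [pvTypes]

theorem pvTypesB (pages : List (List (String × List (List (String × String)))))
    (s : Bool × Bool × Bool × Bool × Bool × Int) :
    pages.foldl (fun st page =>
      (PySem.Dict.getD ⟨page⟩ "elements" []).foldl
        (fun st el => pvStepT st (PySem.Str.lower (PySem.Dict.getD ⟨el⟩ "type" ""))) st) s
    = (pvTypes pages).foldl pvStepT s := by
  induction pages generalizing s with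
  | nil => simp [pvTypes]
  | cons p ps ih =>
    simp only [List.foldl_cons, ih, pvTypes, List.flatMap_cons, List.foldl_append,
      List.foldl_map]

theorem pvFoldFlags (ts : List String) (s : Bool × Bool × Bool × Bool × Bool × Int) :
    ts.foldl pvStepT s =
      (s.1 || ts.any (fun t => PySem.Str.isIn "executive_summary" t),
       s.2.1 || ts.any (fun t => PySem.Str.isIn "chart" t || PySem.Str.isIn "graph" t),
       s.2.2.1 || ts.any (fun t => PySem.Str.isIn "financial" t || PySem.Str.isIn "revenue" t),
       s.2.2.2.1 || ts.any (fun t => PySem.Str.isIn "contact" t),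
       s.2.2.2.2.1 || ts.any (fun t => PySem.Str.isIn "table" t),
       s.2.2.2.2.2 + (ts.count "paragraph" : Int)) := by
  induction ts generalizing s with
  | nil => simp
  | cons t ts ih =>
    simp only [List.foldl_cons, ih, pvStepT, List.any_cons, Bool.or_assoc, List.count_cons]
    refine Prod.ext rfl (Prod.ext rfl (Prod.ext rfl (Prod.ext rfl (Prod.ext rfl ?_))))
    simp only [beq_iff_eq]
    split <;> push_cast <;> ring

-- ===== VERDICT (by name: the statement is the Claim_ definition above) =====
theorem infer_page_role_from_content_py_spec : Claim_equal_infer_page_role_from_content_py := by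
  intro pages page_num _
  show infer_page_role_from_content_py pages page_num = infer_page_role_from_content_py_alt pages page_num
  unfold infer_page_role_from_content_py infer_page_role_from_content_py_alt
  simp only [pvTypesA, pvTypesB, pvFoldFlags, List.nil_append, Bool.false_or,
    PySem.Dict.getD_counter, zero_add]
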